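-- pv_equiv track=rewrite | github.com/hcw3737/programmers | lv_2/124나라.py | solution
-- ===== SOURCE A (Python) =====
-- import itertools
-- import itertools
--
-- def solution(n):
--     num_list = []
--     t = 0
--     i = 1
--     while (True) :
--         t_origin = t
--         t+=3**i
--         if t >= n:
--             num_list += list(map(int,map("".join,(itertools.product(['1','2','4'],repeat = i)))))
--             answer = str(num_list[n-t_origin-1])
--             # answer = i
--             break
--         else :
--             i+=1
--     return i,answer
-- ===== SOURCE B (Python) =====
-- def solution(n):
--     digits = []
--     while n > 0:
--         digits.append("124"[(n - 1) % 3])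
--         n = (n - 1) // 3
--     return len(digits), "".join(reversed(digits))
-- ===== Notes on version B (the rewrite author's own statement) =====
-- stated objective: faster
-- what changed: A searches for the digit count by summing 3^i, then materialises all 3^i candidate 124-numbers with itertools.product and indexes into that list; B computes the answer digit by digit with bijective base-3 arithmetic ((n-1)%3, (n-1)//3), never building any list of candidates.
-- intended difference: For n in {-2,-1,0} A returns a one-digit number ((1,'1'),(1,'2'),(1,'4')) picked from the 1-digit table by Python's negative-index wraparound; B returns (0,'') there, the intended value since there is no 0th or negative-th 124-number. — e.g. on solution(0): A returns (1, "4"), B returns (0, "")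
-- outside the precondition, e.g. on solution(-3): A raises IndexError, B returns (0, '')
import Mathlib
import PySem

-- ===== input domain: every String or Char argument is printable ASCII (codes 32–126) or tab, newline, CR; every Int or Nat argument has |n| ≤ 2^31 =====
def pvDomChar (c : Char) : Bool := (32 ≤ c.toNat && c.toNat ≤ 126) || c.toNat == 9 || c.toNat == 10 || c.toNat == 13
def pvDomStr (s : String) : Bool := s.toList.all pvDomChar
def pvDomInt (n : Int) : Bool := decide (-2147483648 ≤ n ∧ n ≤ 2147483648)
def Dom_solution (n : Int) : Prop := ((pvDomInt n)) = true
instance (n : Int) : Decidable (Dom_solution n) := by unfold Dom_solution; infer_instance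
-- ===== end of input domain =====

-- B replaces A's enumerate-all-candidates search by direct bijective base-3 digit arithmetic;
-- equality of the RETURN values is claimed on Pre_ (n ≥ -2) outside D_ (n ≤ 0).

-- ===== PORT A =====
-- itertools.product(['1','2','4'], repeat = i), each tuple joined by "".join: the standard
-- fold "result = [x+[y] for x in result for y in pool]" over i equal pools, kept as lists
-- of chars (the join of one-char strings is their concatenation).
def pvProd124 : Nat → List (List Char)
  | 0 => [[]]
  | i + 1 => (pvProd124 i).flatMap (fun x => ['1', '2', '4'].map (fun y => x ++ [y]))

-- A's 'while True' loop; state = (num_list, t, i).  The fuel argument only makes the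
-- recursion structural: pvALoop_fuel_mono/solution_spec show the start value n.toNat + 1
-- is enough, so the fuel-0 default is never reached from solution.
-- num_list[n-t_origin-1] is PySem.List.pyGet? (Python's negative-index rule); its none
-- case (IndexError, exactly n ≤ -3) is excluded by Pre_solution.
def pvALoop (fuel : Nat) (n : Int) (numList : List Int) (t : Int) (i : Nat) : Int × String :=
  match fuel with
  | 0 => (0, "")
  | fuel + 1 =>
    let tOrigin := t
    let t' := t + 3 ^ i
    if n ≤ t' then
      let numList' := numList ++ (pvProd124 i).map (fun cs => (PySem.Int.ofChars? cs).getD 0)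
      ((i : Int), PySem.Int.toStr ((PySem.List.pyGet? numList' (n - tOrigin - 1)).getD 0))
    else pvALoop fuel n numList t' (i + 1)

def solution (n : Int) : Int × String := pvALoop (n.toNat + 1) n [] 0 1

-- ===== PORT B =====
-- Source B's 'while n > 0' loop: digits.append("124"[(n-1) % 3]); n = (n-1) // 3.
-- Fuel only makes the recursion structural; n.toNat + 1 is enough (n strictly decreases).
def pvBLoop (fuel : Nat) (n : Int) (digits : List Char) : List Char :=
  match fuel with
  | 0 => digits
  | fuel + 1 =>
    if 0 < n then
      pvBLoop fuel (PySem.Int.floordiv (n - 1) 3)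
        (digits ++ [(PySem.Str.pyGet? "124" (PySem.Int.mod (n - 1) 3)).getD ' '])
    else digits

def solution_alt (n : Int) : Int × String :=
  let ds := pvBLoop (n.toNat + 1) n []
  ((ds.length : Int), String.ofList ds.reverse)

-- ===== PRECONDITION & SPEC =====
-- Pre_ excludes exactly n ≤ -3, where A raises IndexError (negative index past the 1-digit table).
def Pre_solution (n : Int) : Prop := -2 ≤ n
instance (n : Int) : Decidable (Pre_solution n) := by unfold Pre_solution; infer_instance
def pvWitness_solution : Int := 5

-- For n in {-2,-1,0} A returns a one-digit number ((1,"1"),(1,"2"),(1,"4")) picked from the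
-- 1-digit table by Python's negative-index wraparound; B returns (0,""), the intended value
-- since there is no 0th or negative-th 124-number.
def D_solution (n : Int) : Prop := n ≤ 0
instance (n : Int) : Decidable (D_solution n) := by unfold D_solution; infer_instance

def Spec_solution (n : Int) (out : Int × String) : Prop := ¬ D_solution n → out = solution_alt n
instance (n : Int) (out : Int × String) : Decidable (Spec_solution n out) := by unfold Spec_solution; infer_instance

def pvDiffWitness_solution : Int := 0
def pvDiffWitnessOut_solution : (Int × String) × (Int × String) := ((1, "4"), (0, ""))

-- ===== CLAIM (what is proved, stated in full; the proofs are below) =====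
def Claim_unchanged_solution : Prop := ∀ (n : Int), Dom_solution n → Pre_solution n → Spec_solution n (solution n)
def Claim_changed_solution : Prop := Dom_solution (pvDiffWitness_solution) ∧ Pre_solution (pvDiffWitness_solution) ∧ D_solution (pvDiffWitness_solution) ∧ solution (pvDiffWitness_solution) = pvDiffWitnessOut_solution.1 ∧ solution_alt (pvDiffWitness_solution) = pvDiffWitnessOut_solution.2 ∧ pvDiffWitnessOut_solution.1 ≠ pvDiffWitnessOut_solution.2
def Claim_exact_solution : Prop := ∀ (n : Int), Dom_solution n → Pre_solution n → D_solution n → solution n ≠ solution_alt n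

-- ===== LEMMAS AND PROOFS =====

-- ---- pure digit machinery ----

-- "124"[r] for r = 0,1,2
def pvDchar (r : Nat) : Char := if r = 0 then '1' else if r = 1 then '2' else '4'

-- pvT3 i = 3 + 9 + … + 3^i, the count of 124-numbers with at most i digits
def pvT3 : Nat → Nat
  | 0 => 0
  | i + 1 => pvT3 i + 3 ^ (i + 1)

-- the m-th (0-based) i-digit word over {'1','2','4'}, most significant digit first
def pvRep : Nat → Nat → List Char
  | 0, _ => []
  | i + 1, m => pvDchar (m / 3 ^ i) :: pvRep i (m % 3 ^ i)

-- bijective base-3 digits of n, least significant first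
def pvBrec (n : Nat) : List Char :=
  if h : 0 < n then pvDchar ((n - 1) % 3) :: pvBrec ((n - 1) / 3) else []
termination_by n
decreasing_by omega

def pvDecStep (a : Nat) (c : Char) : Nat := a * 10 + (c.toNat - '0'.toNat)
def pvDecVal (cs : List Char) : Nat := cs.foldl pvDecStep 0

-- decimal digit characters of n (no leading zeros for n ≥ 1)
def pvDecChars (n : Nat) : List Char :=
  (if h : 10 ≤ n then pvDecChars (n / 10) else []) ++ [Nat.digitChar (n % 10)]
termination_by n
decreasing_by omega

theorem pvT3_closed (i : Nat) : 2 * pvT3 i + 3 = 3 ^ (i + 1) := by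
  induction i with
  | zero => simp [pvT3]
  | succ i ih =>
      have h1 : pvT3 (i + 1) = pvT3 i + 3 ^ (i + 1) := rfl
      have h2 : (3:Nat) ^ (i + 2) = 3 * 3 ^ (i + 1) := by ring
      omega

theorem pvT3_succ (i : Nat) : pvT3 (i + 1) = 3 * pvT3 i + 3 := by
  have h1 := pvT3_closed i
  have h2 : pvT3 (i + 1) = pvT3 i + 3 ^ (i + 1) := rfl
  omega

theorem pvRep_length (i m : Nat) : (pvRep i m).length = i := by
  induction i generalizing m with
  | zero => rfl
  | succ i ih => simp [pvRep, ih]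

theorem pvRep_mem (i m : Nat) (c : Char) (h : c ∈ pvRep i m) : c = '1' ∨ c = '2' ∨ c = '4' := by
  induction i generalizing m with
  | zero => simp [pvRep] at h
  | succ i ih =>
      simp only [pvRep, List.mem_cons] at h
      rcases h with h | h
      · subst h; unfold pvDchar; split_ifs <;> simp
      · exact ih _ h

-- LSB-form recursion of pvRep
theorem pvRep_lsb (i m : Nat) (hm : m < 3 ^ (i + 1)) :
    pvRep (i + 1) m = pvRep i (m / 3) ++ [pvDchar (m % 3)] := by
  induction i generalizing m with
  | zero =>
      have : m < 3 := by simpa using hm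
      simp [pvRep, Nat.mod_eq_of_lt this]
  | succ i ih =>
      have e1 : m / 3 ^ (i + 1) = (m / 3) / 3 ^ i := by
        rw [Nat.div_div_eq_div_mul, pow_succ, Nat.mul_comm]
      have e2 : (m % 3 ^ (i + 1)) % 3 = m % 3 :=
        Nat.mod_mod_of_dvd m (dvd_pow_self 3 (Nat.succ_ne_zero i))
      have e3 : (m % 3 ^ (i + 1)) / 3 = (m / 3) % 3 ^ i := by
        have : (3:Nat) ^ (i + 1) = 3 * 3 ^ i := by ring
        rw [this]
        exact Nat.mod_mul_right_div_self m 3 (3 ^ i)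
      have hlt : m % 3 ^ (i + 1) < 3 ^ (i + 1) := Nat.mod_lt _ (by positivity)
      calc pvRep (i + 2) m
      _ = pvDchar (m / 3 ^ (i + 1)) :: pvRep (i + 1) (m % 3 ^ (i + 1)) := rfl
      _ = pvDchar (m / 3 ^ (i + 1)) ::
            (pvRep i ((m % 3 ^ (i + 1)) / 3) ++ [pvDchar ((m % 3 ^ (i + 1)) % 3)]) := by
            rw [ih _ hlt]
      _ = pvDchar ((m / 3) / 3 ^ i) :: (pvRep i ((m / 3) % 3 ^ i) ++ [pvDchar (m % 3)]) := by
            rw [e1, e2, e3]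
      _ = pvRep (i + 1) (m / 3) ++ [pvDchar (m % 3)] := rfl

-- pvBrec agrees with pvRep on each digit-length block
theorem pvBrec_block (i m : Nat) (hm : m < 3 ^ (i + 1)) :
    pvBrec (pvT3 i + m + 1) = (pvRep (i + 1) m).reverse := by
  induction i generalizing m with
  | zero =>
      have h3 : m < 3 := by simpa using hm
      have hz : pvT3 0 + m + 1 = m + 1 := by simp [pvT3]
      rw [hz, pvBrec]
      rw [dif_pos (Nat.succ_pos m)]
      have d1 : (m + 1 - 1) % 3 = m := by omega
      have d2 : (m + 1 - 1) / 3 = 0 := by omega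
      rw [d1, d2, pvBrec]
      simp [pvRep]
  | succ i ih =>
      have hpos : 0 < pvT3 (i + 1) + m + 1 := by omega
      rw [pvBrec, dif_pos hpos]
      have hts := pvT3_succ i
      have d1 : (pvT3 (i + 1) + m + 1 - 1) % 3 = m % 3 := by
        rw [hts]; omega
      have d2 : (pvT3 (i + 1) + m + 1 - 1) / 3 = pvT3 i + m / 3 + 1 := by
        rw [hts]
        have : 3 * pvT3 i + 3 + m + 1 - 1 = 3 * (pvT3 i + 1) + m := by ring_nf; omega
        rw [this, Nat.mul_add_div (by norm_num)]
        omega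
      have hdiv : m / 3 < 3 ^ (i + 1) := by
        apply Nat.div_lt_of_lt_mul
        rw [← pow_succ']; exact hm
      rw [d1, d2]
      have : pvT3 i + m / 3 + 1 = pvT3 i + (m / 3) + 1 := rfl
      rw [this, ih _ hdiv, pvRep_lsb (i + 1) m hm]
      simp

theorem pvProd124_length (i : Nat) : (pvProd124 i).length = 3 ^ i := by
  induction i with
  | zero => rfl
  | succ i ih =>
      simp only [pvProd124, List.length_flatMap]
      simp [ih, pow_succ, Nat.mul_comm]

theorem pvFlat3_getElem? (l : List (List Char)) (m : Nat) (hm : m < 3 * l.length) :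
    (l.flatMap (fun x => ['1', '2', '4'].map (fun y => x ++ [y])))[m]? =
      (l[m / 3]?).map (fun x => x ++ [pvDchar (m % 3)]) := by
  induction l generalizing m with
  | nil => simp at hm
  | cons x xs ih =>
      rw [List.flatMap_cons]
      by_cases h3 : m < 3
      · interval_cases m <;> simp [pvDchar]
      · have hlen : (['1', '2', '4'].map (fun y => x ++ [y])).length = 3 := by simp
        rw [List.getElem?_append_right (by omega ▸ hlen ▸ Nat.le_of_not_lt h3)]
        rw [hlen]
        have hm' : m - 3 < 3 * xs.length := by simp at hm; omega
        rw [ih _ hm']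
        have e1 : (m - 3) / 3 = m / 3 - 1 := by omega
        have e2 : (m - 3) % 3 = m % 3 := by omega
        have e3 : 1 ≤ m / 3 := by omega
        rw [e1, e2]
        congr 1
        rw [List.getElem?_cons]
        split
        · omega
        · rfl

theorem pvProd124_getElem? (i m : Nat) (hm : m < 3 ^ i) :
    (pvProd124 i)[m]? = some (pvRep i m) := by
  induction i generalizing m with
  | zero =>
      have : m = 0 := by simpa using hm
      subst this; rfl
  | succ i ih =>
      rw [show pvProd124 (i + 1) = (pvProd124 i).flatMap (fun x => ['1','2','4'].map (fun y => x ++ [y])) from rfl]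
      rw [pvFlat3_getElem? _ m (by rw [pvProd124_length, ← pow_succ']; exact hm)]
      have hdiv : m / 3 < 3 ^ i := by
        apply Nat.div_lt_of_lt_mul
        rw [← pow_succ']; exact hm
      rw [ih _ hdiv, pvRep_lsb i m hm]
      rfl

-- ---- int(s) and str(n) on pure '1'/'2'/'4' strings ----

-- the numeral parser inside PySem.Int.ofChars? is private; this names it (and its
-- defining equations) abstractly, each component holding by rfl
theorem pvOfCharsExists : ∃ (dv : List Char → Option Nat) (g : List Char → Bool → Nat → Option Nat),
    (∀ cs : List Char, PySem.Int.ofChars? cs =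
      match (List.dropWhile PySem.Int.isIntSpace (List.dropWhile PySem.Int.isIntSpace cs).reverse).reverse with
      | '-' :: ds => Option.map (fun n => -n) (do let a ← dv ds; pure (a : Int))
      | '+' :: ds => Option.map (fun n : Int => n) (do let a ← dv ds; pure (a : Int))
      | ds => Option.map (fun n : Int => n) (do let a ← dv ds; pure (a : Int))) ∧
    (∀ cs : List Char, dv cs = match cs with | [] => none | cs => g cs false 0) ∧
    (∀ b a, g [] b a = if b = true then some a else none) ∧
    (∀ c r b a, c.isDigit = true → g (c :: r) b a = g r true (pvDecStep a c)) := by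
  refine ⟨_, _, fun cs => by unfold PySem.Int.ofChars?; rfl, fun cs => rfl, fun b a => rfl, ?_⟩
  intro c r b a h
  show (if c.isDigit = true then _ else _) = _
  rw [if_pos h]
  rfl

theorem pvNoSpace (cs : List Char) (hc : ∀ c ∈ cs, c = '1' ∨ c = '2' ∨ c = '4') :
    List.dropWhile PySem.Int.isIntSpace cs = cs := by
  cases cs with
  | nil => rfl
  | cons c r =>
      rw [List.dropWhile_cons_of_neg]
      rcases hc c (List.mem_cons_self) with h | h | h <;> subst h <;> decide

theorem pvOfChars124 (cs : List Char) (hne : cs ≠ [])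
    (hc : ∀ c ∈ cs, c = '1' ∨ c = '2' ∨ c = '4') :
    PySem.Int.ofChars? cs = some (Int.ofNat (pvDecVal cs)) := by
  obtain ⟨dv, g, hwrap, hlink, hnil, hcons⟩ := pvOfCharsExists
  have hgval : ∀ (r : List Char) (a : Nat), (∀ c ∈ r, c = '1' ∨ c = '2' ∨ c = '4') →
      g r true a = some (r.foldl pvDecStep a) := by
    intro r
    induction r with
    | nil => intro a _; rw [hnil]; rfl
    | cons c r ihr =>
        intro a hmem
        have hd : c.isDigit = true := by
          rcases hmem c List.mem_cons_self with h | h | h <;> subst h <;> decide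
        rw [hcons c r true a hd, ihr _ (fun x hx => hmem x (List.mem_cons_of_mem _ hx))]
        rfl
  rw [hwrap cs]
  have hrev : ∀ c ∈ cs.reverse, c = '1' ∨ c = '2' ∨ c = '4' := by
    intro c hcr; exact hc c (List.mem_reverse.mp hcr)
  rw [pvNoSpace cs hc, pvNoSpace cs.reverse hrev, List.reverse_reverse]
  cases cs with
  | nil => exact absurd rfl hne
  | cons c r =>
      have hdv : dv (c :: r) = g (c :: r) false 0 := by rw [hlink]
      have hcd : c.isDigit = true := by
        rcases hc c List.mem_cons_self with h | h | h <;> subst h <;> decide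
      have hg : g (c :: r) false 0 = some (r.foldl pvDecStep (pvDecStep 0 c)) := by
        rw [hcons c r false 0 hcd]
        exact hgval r _ (fun x hx => hc x (List.mem_cons_of_mem _ hx))
      have hval : dv (c :: r) = some (pvDecVal (c :: r)) := by
        rw [hdv, hg]; rfl
      rcases hc c List.mem_cons_self with h | h | h <;> subst h <;>
        · show Option.map _ (do let a ← dv _; pure ((a : Nat) : Int)) = _
          rw [hval]
          rfl

theorem pvFoldl_ge (r : List Char) (a : Nat) : a ≤ r.foldl pvDecStep a := by
  induction r generalizing a with
  | nil => simp
  | cons c r ih =>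
      have h1 : a ≤ pvDecStep a c := by unfold pvDecStep; omega
      exact le_trans h1 (ih _)

theorem pvDecVal_pos (cs : List Char) (hne : cs ≠ [])
    (hc : ∀ c ∈ cs, c = '1' ∨ c = '2' ∨ c = '4') : 1 ≤ pvDecVal cs := by
  cases cs with
  | nil => exact absurd rfl hne
  | cons c r =>
      have h1 : 1 ≤ pvDecStep 0 c := by
        rcases hc c List.mem_cons_self with h | h | h <;> subst h <;> decide
      calc 1 ≤ pvDecStep 0 c := h1
      _ ≤ r.foldl pvDecStep (pvDecStep 0 c) := pvFoldl_ge r _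
      _ = pvDecVal (c :: r) := rfl

theorem pvDecChars_val (cs : List Char) (hne : cs ≠ [])
    (hc : ∀ c ∈ cs, c = '1' ∨ c = '2' ∨ c = '4') :
    pvDecChars (pvDecVal cs) = cs := by
  induction cs using List.reverseRecOn with
  | nil => exact absurd rfl hne
  | append_singleton ds c ih =>
      have hdc : pvDecVal (ds ++ [c]) = (pvDecVal ds) * 10 + (c.toNat - '0'.toNat) := by
        unfold pvDecVal
        rw [List.foldl_append]
        rfl
      have hcv : c.toNat - '0'.toNat = 1 ∨ c.toNat - '0'.toNat = 2 ∨ c.toNat - '0'.toNat = 4 := by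
        rcases hc c (by simp) with h | h | h <;> subst h <;> decide
      have hchar : Nat.digitChar (c.toNat - '0'.toNat) = c := by
        rcases hc c (by simp) with h | h | h <;> subst h <;> decide
      cases hds : ds with
      | nil =>
          subst hds
          have hv : pvDecVal ([] ++ [c]) = c.toNat - '0'.toNat := by
            simp [pvDecVal, pvDecStep]
          rw [hv, pvDecChars, dif_neg (by omega), Nat.mod_eq_of_lt (by omega), hchar]
      | cons d r =>
          rw [← hds]
          have hdsne : ds ≠ [] := by rw [hds]; simp
          have hdsmem : ∀ x ∈ ds, x = '1' ∨ x = '2' ∨ x = '4' := by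
            intro x hx; exact hc x (by simp [hx])
          have hpos := pvDecVal_pos ds hdsne hdsmem
          have hbig : 10 ≤ pvDecVal (ds ++ [c]) := by rw [hdc]; omega
          rw [pvDecChars, dif_pos hbig, hdc]
          have e1 : (pvDecVal ds * 10 + (c.toNat - '0'.toNat)) / 10 = pvDecVal ds := by omega
          have e2 : (pvDecVal ds * 10 + (c.toNat - '0'.toNat)) % 10 = c.toNat - '0'.toNat := by omega
          rw [e1, e2, hchar, ih hdsne hdsmem]

theorem pvToDigitsCore (fuel n : Nat) (acc : List Char) (h : n < fuel) :
    Nat.toDigitsCore 10 fuel n acc = pvDecChars n ++ acc := by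
  induction fuel generalizing n acc with
  | zero => omega
  | succ fuel ih =>
      rw [Nat.toDigitsCore]
      by_cases h0 : n / 10 = 0
      · rw [if_pos h0]
        rw [pvDecChars, dif_neg (by omega)]
        simp
      · rw [if_neg h0]
        have hn10 : 10 ≤ n := by omega
        have hlt : n / 10 < fuel := by
          have h1 : n / 10 < n := Nat.div_lt_self (by omega) (by norm_num)
          omega
        rw [ih _ _ hlt]
        conv_rhs => rw [pvDecChars]
        rw [dif_pos hn10]
        simp

theorem pvToChars124 (cs : List Char) (hne : cs ≠ [])
    (hc : ∀ c ∈ cs, c = '1' ∨ c = '2' ∨ c = '4') :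
    PySem.Int.toChars (Int.ofNat (pvDecVal cs)) = cs := by
  unfold PySem.Int.toChars
  rw [if_neg (by simp)]
  have : (Int.ofNat (pvDecVal cs)).toNat = pvDecVal cs := rfl
  rw [this]
  show Nat.toDigitsCore 10 (pvDecVal cs + 1) (pvDecVal cs) [] = cs
  rw [pvToDigitsCore _ _ _ (Nat.lt_succ_self _)]
  rw [List.append_nil]
  exact pvDecChars_val cs hne hc

-- ---- B's loop ----

theorem pvPyGet124 (k : Nat) (hk : k < 3) :
    (PySem.Str.pyGet? "124" ((k : Nat) : Int)).getD ' ' = pvDchar k := by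
  interval_cases k <;> decide

theorem pvBLoop_eq (fuel : Nat) (n : Int) (acc : List Char) (h : n.toNat < fuel) :
    pvBLoop fuel n acc = acc ++ pvBrec n.toNat := by
  induction fuel generalizing n acc with
  | zero => omega
  | succ fuel ih =>
      rw [pvBLoop]
      by_cases hn : 0 < n
      · rw [if_pos hn]
        have hcast : n - 1 = ((n.toNat - 1 : Nat) : Int) := by omega
        have hmod : PySem.Int.mod (n - 1) 3 = (((n.toNat - 1) % 3 : Nat) : Int) := by
          rw [hcast]; exact_mod_cast PySem.Int.mod_natCast (n.toNat - 1) 3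
        have hfdv : PySem.Int.floordiv (n - 1) 3 = (((n.toNat - 1) / 3 : Nat) : Int) := by
          rw [hcast]; exact_mod_cast PySem.Int.floordiv_natCast (n.toNat - 1) 3
        rw [hmod, hfdv]
        rw [pvPyGet124 _ (Nat.mod_lt _ (by norm_num))]
        have hfd : (((n.toNat - 1) / 3 : Nat) : Int).toNat < fuel := by
          rw [Int.toNat_natCast]
          have := Nat.div_le_self (n.toNat - 1) 3
          omega
        rw [ih _ _ hfd, Int.toNat_natCast]
        conv_rhs => rw [pvBrec]
        rw [dif_pos (by omega)]
        simp
      · rw [if_neg hn]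
        have : n.toNat = 0 := by omega
        rw [this, pvBrec, dif_neg (by omega)]
        simp

-- ---- A's loop ----

theorem pvBlockCase (i : Nat) (n : Int) (h1 : (pvT3 i : Int) < n) (h2 : n ≤ (pvT3 (i + 1) : Int)) :
    (((i + 1 : Nat) : Int),
      PySem.Int.toStr ((PySem.List.pyGet?
        ((pvProd124 (i + 1)).map (fun cs => (PySem.Int.ofChars? cs).getD 0)) (n - (pvT3 i) - 1)).getD 0))
      = solution_alt n := by
  have hT : pvT3 (i + 1) = pvT3 i + 3 ^ (i + 1) := rfl
  set m : Nat := n.toNat - pvT3 i - 1 with hm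
  have hcast : n - (pvT3 i) - 1 = ((m : Nat) : Int) := by omega
  have hmlt : m < 3 ^ (i + 1) := by
    have h2' : n.toNat ≤ pvT3 (i + 1) := by omega
    omega
  have hrne : pvRep (i + 1) m ≠ [] := by
    have := pvRep_length (i + 1) m
    intro hcon; rw [hcon] at this; simp at this
  have hrmem := pvRep_mem (i + 1) m
  rw [hcast, PySem.List.pyGet?_natCast, List.getElem?_map]
  rw [pvProd124_getElem? (i + 1) m hmlt]
  rw [Option.map_some, pvOfChars124 _ hrne hrmem]
  rw [Option.getD_some, Option.getD_some]
  unfold PySem.Int.toStr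
  rw [pvToChars124 _ hrne hrmem]
  show _ = (((pvBLoop (n.toNat + 1) n []).length : Int), String.ofList (pvBLoop (n.toNat + 1) n []).reverse)
  rw [pvBLoop_eq (n.toNat + 1) n [] (Nat.lt_succ_self _)]
  rw [List.nil_append]
  have hnn : n.toNat = pvT3 i + m + 1 := by omega
  rw [hnn, pvBrec_block i m hmlt]
  rw [List.reverse_reverse, List.length_reverse, pvRep_length]

theorem pvALoop_spec (fuel i : Nat) (n : Int) (h1 : (pvT3 i : Int) < n)
    (h2 : n ≤ (pvT3 (i + fuel) : Int)) :
    pvALoop fuel n [] (pvT3 i) (i + 1) = solution_alt n := by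
  induction fuel generalizing i with
  | zero => simp at h2; omega
  | succ fuel ih =>
      rw [pvALoop]
      have hT : ((pvT3 (i + 1) : Nat) : Int) = (pvT3 i : Int) + 3 ^ (i + 1) := by
        have : pvT3 (i + 1) = pvT3 i + 3 ^ (i + 1) := rfl
        push_cast [this]; ring
      by_cases hb : n ≤ (pvT3 i : Int) + 3 ^ (i + 1)
      · rw [if_pos hb]
        have := pvBlockCase i n h1 (by rw [hT]; exact hb)
        simpa using this
      · rw [if_neg hb]
        have h1' : (pvT3 (i + 1) : Int) < n := by rw [hT]; omega
        have h2' : n ≤ (pvT3 ((i + 1) + fuel) : Int) := by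
          have : (i + 1) + fuel = i + (fuel + 1) := by omega
          rw [this]; exact h2
        have := ih (i + 1) h1' h2'
        rw [hT] at this
        exact this
  
theorem pvT3_big (k : Nat) : k < pvT3 (k + 1) := by
  have h1 : pvT3 (k + 1) = pvT3 k + 3 ^ (k + 1) := rfl
  have h2 : k + 1 < 3 ^ (k + 1) := Nat.lt_pow_self (by norm_num)
  omega

-- ===== VERDICT (by name: the statement is the Claim_ definition above) =====
theorem solution_spec : Claim_unchanged_solution := by
  intro n _ hpre hnd
  unfold Pre_solution at hpre
  unfold D_solution at hnd
  have hpos : 1 ≤ n := by omega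
  have h1 : (pvT3 0 : Int) < n := by simp [pvT3]; omega
  have h2 : n ≤ (pvT3 (0 + (n.toNat + 1)) : Int) := by
    have := pvT3_big n.toNat
    simp only [Nat.zero_add]
    omega
  have := pvALoop_spec (n.toNat + 1) 0 n h1 h2
  show pvALoop (n.toNat + 1) n [] 0 1 = solution_alt n
  have h0 : ((pvT3 0 : Nat) : Int) = 0 := by simp [pvT3]
  rw [← h0]
  exact this

theorem solution_changed : Claim_changed_solution := by unfold Claim_changed_solution; decide

theorem solution_tight : Claim_exact_solution := by
  intro n _ hpre hd
  unfold Pre_solution at hpre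
  unfold D_solution at hd
  have : n = -2 ∨ n = -1 ∨ n = 0 := by omega
  rcases this with h | h | h <;> subst h <;> decide
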